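-- pv_equiv track=rewrite | github.com/oO0O0o0O/Game_Breakers-TicTacToe | genOptions.py | getStrategy
-- ===== SOURCE A (Python) =====
-- def getStrategy(number):
--     remainder = None
--     strategy = []
--     for i in range(9):
--         remainder = number % 9
--         number = number // 9
--         strategy.insert(0, remainder)
--     return strategy
-- ===== SOURCE B (Python) =====
-- def getStrategy(number):
--     return [(number // 9 ** (8 - i)) % 9 for i in range(9)]
-- ===== Notes on version B (the rewrite author's own statement) =====
-- stated objective: simpler
-- what changed: Replaced the running-quotient loop with insert(0,...) by a comprehension that computes each digit independently from the original number via its place value (floor-divide by the descending power of the base, then take the remainder).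
import Mathlib
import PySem

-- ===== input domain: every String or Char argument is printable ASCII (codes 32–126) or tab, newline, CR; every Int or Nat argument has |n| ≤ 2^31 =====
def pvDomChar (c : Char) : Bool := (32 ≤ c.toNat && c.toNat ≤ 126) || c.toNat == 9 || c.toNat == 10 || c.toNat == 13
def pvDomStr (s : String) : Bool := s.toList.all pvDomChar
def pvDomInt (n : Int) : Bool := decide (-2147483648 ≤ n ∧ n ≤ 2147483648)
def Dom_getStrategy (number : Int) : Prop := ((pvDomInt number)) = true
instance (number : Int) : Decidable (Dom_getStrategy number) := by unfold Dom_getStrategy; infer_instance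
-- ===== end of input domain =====

-- B replaces A's running-quotient loop by computing each digit directly from the
-- original number via its place value; objective: simpler (same O(9) cost).

-- ===== PORT A =====
-- state: (remainder, number, strategy); insert(0, r) = cons
def getStrategy (number : Int) : List Int :=
  let s : Option Int × Int × List Int :=
    (PySem.List.pyRange 0 9 1).foldl
      (fun (st : Option Int × Int × List Int) _ =>
        let remainder := PySem.Int.mod st.2.1 9
        let number' := PySem.Int.floordiv st.2.1 9
        (some remainder, number', remainder :: st.2.2))
      (none, number, [])
  s.2.2

-- ===== PORT B =====
def getStrategy_alt (number : Int) : List Int :=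
  (PySem.List.pyRange 0 9 1).map
    (fun i => PySem.Int.mod (PySem.Int.floordiv number (9 ^ (8 - i).toNat)) 9)

-- ===== PRECONDITION & SPEC =====
def Spec_getStrategy (number : Int) (out : List Int) : Prop := out = getStrategy_alt number
instance (number : Int) (out : List Int) : Decidable (Spec_getStrategy number out) := by unfold Spec_getStrategy; infer_instance

-- ===== CLAIM (what is proved, stated in full; the proofs are below) =====
def Claim_equal_getStrategy : Prop := ∀ (number : Int), Dom_getStrategy number → Spec_getStrategy number (getStrategy number)

-- ===== LEMMAS AND PROOFS =====
theorem estep (n : Int) (k : Nat) : n / 9 ^ k / 9 ^ 1 = n / 9 ^ (k + 1) := by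
  rw [Int.ediv_ediv_of_nonneg (by positivity), pow_one, ← pow_succ]

-- ===== VERDICT (by name: the statement is the Claim_ definition above) =====
theorem getStrategy_spec : Claim_equal_getStrategy := by
  intro n _
  show _ = _
  simp only [getStrategy, getStrategy_alt, PySem.List.pyRange]
  norm_num [show List.range (Int.toNat 9) = [0,1,2,3,4,5,6,7,8] from by decide]
  repeat rw [show ∀ m : Int, m / 9 = m / 9 ^ 1 from fun m => by norm_num]
  simp only [estep, show Int.toNat 8 = 8 from rfl, show Int.toNat 7 = 7 from rfl, show Int.toNat 6 = 6 from rfl, show Int.toNat 5 = 5 from rfl, show Int.toNat 4 = 4 from rfl, show Int.toNat 3 = 3 from rfl, show Int.toNat 2 = 2 from rfl]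
  norm_num
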